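-- pv_equiv track=rewrite | github.com/thulab/IginX | python_scripts/udf_sum.py | transform
-- ===== SOURCE A (Python) =====
-- def transform(rows):
--     res = []
--     for row in zip(*rows):
--         sum = 0
--         for num in row:
--             if num is not None:
--                 sum += num
--         res.append(sum)
--     return res
-- ===== SOURCE B (Python) =====
-- def transform(rows):
--     if not rows:
--         return []
--     ncols = min(len(r) for r in rows)
--     res = [0] * ncols
--     for row in rows:
--         res = [res[j] if row[j] is None else res[j] + row[j] for j in range(ncols)]
--     return res
-- ===== Notes on version B (the rewrite author's own statement) =====
-- stated objective: alternative
-- what changed: single row-major pass maintaining an indexed per-column accumulator of width min(len(r)) instead of transposing via zip(*rows) and summing each column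
import Mathlib
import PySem

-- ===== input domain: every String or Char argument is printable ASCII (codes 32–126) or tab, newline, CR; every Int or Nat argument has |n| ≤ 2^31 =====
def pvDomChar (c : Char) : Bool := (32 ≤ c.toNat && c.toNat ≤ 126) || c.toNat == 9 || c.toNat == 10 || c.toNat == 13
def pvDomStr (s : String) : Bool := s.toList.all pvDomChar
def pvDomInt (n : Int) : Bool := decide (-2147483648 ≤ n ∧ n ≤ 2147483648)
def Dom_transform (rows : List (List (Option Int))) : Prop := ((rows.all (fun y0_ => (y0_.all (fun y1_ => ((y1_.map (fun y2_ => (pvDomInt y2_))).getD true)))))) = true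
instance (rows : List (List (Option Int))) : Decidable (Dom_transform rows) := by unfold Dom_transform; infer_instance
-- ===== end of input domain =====

-- B replaces the zip(*rows) transpose of A by a single row-major pass over rows
-- maintaining an indexed per-column accumulator of width min(len(r) for r in rows) (objective: alternative).

-- B replaces the zip(*rows) transpose of A by a single row-major pass over rows
-- maintaining an indexed per-column accumulator of width min(len(r) for r in rows) (objective: alternative).

-- ===== PORT A =====
-- zip(*rows): repeatedly take the heads while no iterator is exhausted (exact for zip of lists)
def zipStar (rows : List (List (Option Int))) : List (List (Option Int)) :=
  if rows.isEmpty then []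
  else if rows.any List.isEmpty then []
  else (rows.map (fun r => r.headD none)) :: zipStar (rows.map List.tail)
termination_by (rows.headD []).length
decreasing_by
  cases rows with
  | nil => simp at *
  | cons r rs =>
    rename_i h1 h2
    simp at h2
    cases r with
    | nil => exact absurd h2.1 (by simp)
    | cons x xs => simp

def transform (rows : List (List (Option Int))) : List Int :=
  (zipStar rows).map (fun row =>
    row.foldl (fun s num =>
      match num with
      | some v => s + v
      | none => s) 0)

-- ===== PORT B =====
-- min(len(r) for r in rows) over a nonempty rows
def minLen (rows : List (List (Option Int))) : Nat :=
  match rows with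
  | [] => 0
  | r :: rs => rs.foldl (fun m t => min m t.length) r.length

def transform_alt (rows : List (List (Option Int))) : List Int :=
  if rows.isEmpty then []
  else
    let n := minLen rows
    rows.foldl (fun res row =>
      (List.range n).map (fun j =>
        match row.getD j none with
        | some v => res.getD j 0 + v
        | none => res.getD j 0)) (List.replicate n 0)

-- ===== PRECONDITION & SPEC =====
def Spec_transform (rows : List (List (Option Int))) (out : List Int) : Prop := out = transform_alt rows
instance (rows : List (List (Option Int))) (out : List Int) : Decidable (Spec_transform rows out) := by unfold Spec_transform; infer_instance

-- ===== CLAIM (what is proved, stated in full; the proofs are below) =====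
def Claim_equal_transform : Prop := ∀ (rows : List (List (Option Int))), Dom_transform rows → Spec_transform rows (transform rows)

-- ===== LEMMAS AND PROOFS =====

theorem foldl_min_le_acc (rs : List (List (Option Int))) (a : Nat) :
    rs.foldl (fun m t => min m t.length) a ≤ a := by
  induction rs generalizing a with
  | nil => simp
  | cons t ts ih => exact le_trans (ih _) (min_le_left _ _)

theorem foldl_min_le_mem (rs : List (List (Option Int))) (a : Nat)
    (t : List (Option Int)) (ht : t ∈ rs) :
    rs.foldl (fun m t => min m t.length) a ≤ t.length := by
  induction rs generalizing a with
  | nil => cases ht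
  | cons u us ih =>
    rcases List.mem_cons.mp ht with h | h
    · subst h
      exact le_trans (foldl_min_le_acc us _) (min_le_right _ _)
    · exact ih _ h

theorem foldl_min_pos (rs : List (List (Option Int))) (a : Nat)
    (hr : ∀ t ∈ rs, 1 ≤ t.length) (ha : 1 ≤ a) :
    1 ≤ rs.foldl (fun m t => min m t.length) a := by
  induction rs generalizing a with
  | nil => simpa
  | cons u us ih =>
    have h1 := hr u (by simp)
    exact ih _ (fun t ht => hr t (by simp [ht])) (le_min ha h1)

theorem foldl_min_pred (rs : List (List (Option Int))) (a : Nat) :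
    rs.foldl (fun m t => min m (t.length - 1)) (a - 1)
      = rs.foldl (fun m t => min m t.length) a - 1 := by
  induction rs generalizing a with
  | nil => simp
  | cons u us ih =>
    simp only [List.foldl_cons]
    rw [show min (a - 1) (u.length - 1) = min a u.length - 1 by omega]
    exact ih _

theorem minLen_tail (r : List (Option Int)) (rs : List (List (Option Int))) :
    minLen ((r :: rs).map List.tail) = minLen (r :: rs) - 1 := by
  simp only [minLen, List.map_cons, List.foldl_map, List.length_tail]
  exact foldl_min_pred rs r.length

theorem minLen_pos (r : List (Option Int)) (rs : List (List (Option Int)))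
    (hall : ∀ t ∈ (r :: rs), t ≠ []) :
    1 ≤ minLen (r :: rs) := by
  have hrs : ∀ t ∈ rs, 1 ≤ t.length := by
    intro t ht
    have := hall t (by simp [ht])
    cases t with
    | nil => simp at this
    | cons x xs => simp
  have hr : 1 ≤ r.length := by
    have := hall r (by simp)
    cases r with
    | nil => simp at this
    | cons x xs => simp
  exact foldl_min_pos rs r.length hrs hr

theorem minLen_of_empty_mem (rows : List (List (Option Int)))
    (h : ∃ t ∈ rows, t = []) : minLen rows = 0 := by
  cases rows with
  | nil => rfl
  | cons r rs =>
    rcases h with ⟨t, ht, rfl⟩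
    rcases List.mem_cons.mp ht with h | h
    · cases h
      have := foldl_min_le_acc rs ([] : List (Option Int)).length
      simp only [minLen]
      simp at this ⊢
      omega
    · have := foldl_min_le_mem rs r.length [] h
      simp only [minLen]
      simp at this
      omega

theorem zipStar_eq_of_any (rows : List (List (Option Int)))
    (hne : rows ≠ []) (h2 : rows.any List.isEmpty = true) :
    zipStar rows
      = (List.range (minLen rows)).map (fun j => rows.map (fun r => r.getD j none)) := by
  have h0 : minLen rows = 0 := by
    apply minLen_of_empty_mem
    rcases List.any_eq_true.mp h2 with ⟨t, ht, h⟩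
    exact ⟨t, ht, by simpa [List.isEmpty_iff] using h⟩
  rw [zipStar]
  simp [hne, h2, h0]

theorem zipStar_eq_aux (k : Nat) : ∀ (rows : List (List (Option Int))),
    (rows.headD []).length ≤ k → rows ≠ [] →
    zipStar rows
      = (List.range (minLen rows)).map (fun j => rows.map (fun r => r.getD j none)) := by
  induction k with
  | zero =>
    intro rows hk hne
    cases rows with
    | nil => exact absurd rfl hne
    | cons r rs =>
      have hr : r = [] := by
        cases r with
        | nil => rfl
        | cons x xs => simp at hk
      apply zipStar_eq_of_any _ hne
      subst hr
      simp
  | succ k ih =>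
    intro rows hk hne
    by_cases hemp : rows.any List.isEmpty = true
    · exact zipStar_eq_of_any rows hne hemp
    · cases rows with
      | nil => exact absurd rfl hne
      | cons r rs =>
        have hall : ∀ t ∈ (r :: rs), t ≠ [] := by
          intro t ht hnil
          simp only [List.any_eq_true] at hemp
          exact hemp ⟨t, ht, by simp [hnil]⟩
        have hemp' : (r :: rs).any List.isEmpty = false := by
          simp only [Bool.not_eq_true] at hemp
          exact hemp
        have hmk : (((r :: rs).map List.tail).headD []).length ≤ k := by
          simp only [List.map_cons, List.headD_cons, List.length_tail]
          simp only [List.headD_cons] at hk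
          omega
        rw [zipStar]
        simp only [List.isEmpty_cons, hemp', Bool.false_eq_true, if_false]
        rw [ih ((r :: rs).map List.tail) hmk (by simp), minLen_tail r rs]
        have hpos := minLen_pos r rs hall
        obtain ⟨m, hm⟩ : ∃ m, minLen (r :: rs) = m + 1 := ⟨minLen (r :: rs) - 1, by omega⟩
        rw [hm]
        simp only [Nat.add_sub_cancel, List.range_succ_eq_map, List.map_cons, List.map_map]
        congr 1
        · congr 1
          · have := hall r (by simp)
            cases r with
            | nil => simp at this
            | cons x xs => rfl
          · apply List.map_congr_left
            intro t ht
            have := hall t (by simp [ht])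
            cases t with
            | nil => simp at this
            | cons x xs => rfl
        · apply List.map_congr_left
          intro j _
          simp only [Function.comp]
          congr 1
          · cases r <;> rfl
          · apply List.map_congr_left
            intro t _
            cases t <;> rfl

theorem getD_map_range {α : Type} [Inhabited α] (n j : Nat) (h : Nat → α) (hj : j < n) (d : α) :
    ((List.range n).map h).getD j d = h j := by
  simp [List.getD_eq_getElem?_getD, hj]

theorem bfold (n : Nat) (rows : List (List (Option Int))) (h : Nat → Int) :
    rows.foldl (fun res row =>
      (List.range n).map (fun j =>
        match row.getD j none with
        | some v => res.getD j 0 + v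
        | none => res.getD j 0)) ((List.range n).map h)
    = (List.range n).map (fun j =>
        rows.foldl (fun s row =>
          match row.getD j none with
          | some v => s + v
          | none => s) (h j)) := by
  induction rows generalizing h with
  | nil => rfl
  | cons row rest ih =>
    simp only [List.foldl_cons]
    have hstep : (List.range n).map (fun j =>
        match row.getD j none with
        | some v => ((List.range n).map h).getD j 0 + v
        | none => ((List.range n).map h).getD j 0)
      = (List.range n).map (fun j =>
        match row.getD j none with
        | some v => h j + v
        | none => h j) := by
      apply List.map_congr_left
      intro j hj
      rw [getD_map_range n j h (List.mem_range.mp hj)]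
    rw [hstep, ih]

theorem replicate_eq_map_range (n : Nat) :
    List.replicate n (0 : Int) = (List.range n).map (fun _ => (0 : Int)) := by
  simp

-- ===== VERDICT (by name: the statement is the Claim_ definition above) =====
theorem transform_spec : Claim_equal_transform := by
  intro rows _
  unfold Spec_transform transform transform_alt
  cases rows with
  | nil =>
    rw [zipStar]
    simp
  | cons r rs =>
    simp only [List.isEmpty_cons, Bool.false_eq_true, if_false]
    rw [zipStar_eq_aux ((r :: rs).headD []).length (r :: rs) le_rfl (by simp),
        List.map_map, replicate_eq_map_range, bfold]
    apply List.map_congr_left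
    intro j _
    simp only [Function.comp]
    rw [List.foldl_map]
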